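-- pv_equiv track=rewrite | github.com/The-ASHES-Laboratory/abg_emp_hmp | scripts/00_harmonize_taxonomy.py | choose_canonical_taxonomy
-- ===== SOURCE A (Python) =====
-- def choose_canonical_taxonomy(taxon_list):
--     """Choose the SILVA taxonomy as canonical (since burial/EMP use SILVA).
--
--     If no SILVA entry exists, use the Greengenes one.
--     """
--     silva = [t for t in taxon_list if t.startswith("d__")]
--     gg = [t for t in taxon_list if t.startswith("Root")]
--     other = [t for t in taxon_list if not t.startswith("d__") and not t.startswith("Root")]
--
--     # Prefer SILVA
--     if silva:
--         return silva[0]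
--     elif gg:
--         return gg[0]
--     elif other:
--         return other[0]
--     return taxon_list[0]
-- ===== SOURCE B (Python) =====
-- def choose_canonical_taxonomy(taxon_list):
--     """Pick the element minimising (source priority, position): SILVA=0, Greengenes=1, other=2."""
--     def rank(t):
--         if t.startswith("d__"):
--             return 0
--         if t.startswith("Root"):
--             return 1
--         return 2
--     return min(enumerate(taxon_list), key=lambda p: (rank(p[1]), p[0]))[1]
-- ===== Notes on version B (the rewrite author's own statement) =====
-- stated objective: alternative
-- what changed: Replaced A's three staged filtering passes and priority if/elif chain by a single extremal-element query: min over enumerate(taxon_list) with the lexicographic key (source rank, position), where rank is SILVA=0, Greengenes=1, other=2.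
-- outside the precondition, e.g. on choose_canonical_taxonomy([]): A raises IndexError, B raises ValueError
import Mathlib
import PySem

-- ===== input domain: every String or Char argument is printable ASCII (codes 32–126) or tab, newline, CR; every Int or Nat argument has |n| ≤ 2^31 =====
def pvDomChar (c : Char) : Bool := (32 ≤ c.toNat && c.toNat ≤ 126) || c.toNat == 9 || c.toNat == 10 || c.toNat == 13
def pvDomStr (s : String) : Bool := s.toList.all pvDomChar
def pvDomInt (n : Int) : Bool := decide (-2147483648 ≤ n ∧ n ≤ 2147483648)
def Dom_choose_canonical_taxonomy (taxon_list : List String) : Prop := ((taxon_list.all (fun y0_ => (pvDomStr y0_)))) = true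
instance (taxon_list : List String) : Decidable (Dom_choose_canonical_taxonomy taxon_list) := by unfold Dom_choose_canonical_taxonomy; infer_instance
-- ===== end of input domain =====

-- B reduces the task to one extremal-element query: min over enumerate with key (priority, index) (objective: alternative).

-- ===== PORT A =====
def choose_canonical_taxonomy (taxon_list : List String) : String :=
  let silva := taxon_list.filter (fun t => PySem.Str.startswith t "d__")
  let gg := taxon_list.filter (fun t => PySem.Str.startswith t "Root")
  let other := taxon_list.filter (fun t =>
    !PySem.Str.startswith t "d__" && !PySem.Str.startswith t "Root")
  match silva with
  | s :: _ => s
  | [] =>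
    match gg with
    | g :: _ => g
    | [] =>
      match other with
      | o :: _ => o
      | [] => (PySem.List.pyGet? taxon_list 0).getD ""   -- taxon_list[0]; none (IndexError) only on [], excluded by Pre_

-- ===== PORT B =====
-- inner helper rank(t): the priority of a taxonomy source
def pvRank (t : String) : Int :=
  if PySem.Str.startswith t "d__" then 0
  else if PySem.Str.startswith t "Root" then 1
  else 2

def choose_canonical_taxonomy_alt (taxon_list : List String) : String :=
  -- min(enumerate(taxon_list), key=lambda p: (rank(p[1]), p[0]))[1]
  match PySem.List.min2? (PySem.List.enumerate taxon_list)
      (fun p => pvRank p.2) (fun p => p.1) with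
  | some p => p.2
  | none => ""   -- min() on an empty iterable raises ValueError; excluded by Pre_

-- ===== PRECONDITION & SPEC =====
-- Pre_ excludes only the empty list, on which A raises IndexError and B raises ValueError.
def Pre_choose_canonical_taxonomy (taxon_list : List String) : Prop := taxon_list ≠ []
instance (taxon_list : List String) : Decidable (Pre_choose_canonical_taxonomy taxon_list) := by
  unfold Pre_choose_canonical_taxonomy; infer_instance

def pvWitness_choose_canonical_taxonomy : List String := ["Root;k__Bacteria", "d__Bacteria"]

def Spec_choose_canonical_taxonomy (taxon_list : List String) (out : String) : Prop :=
  out = choose_canonical_taxonomy_alt taxon_list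
instance (taxon_list : List String) (out : String) :
    Decidable (Spec_choose_canonical_taxonomy taxon_list out) := by
  unfold Spec_choose_canonical_taxonomy; infer_instance

-- ===== CLAIM =====
def Claim_equal_choose_canonical_taxonomy : Prop :=
  ∀ (taxon_list : List String), Dom_choose_canonical_taxonomy taxon_list →
    Pre_choose_canonical_taxonomy taxon_list →
    Spec_choose_canonical_taxonomy taxon_list (choose_canonical_taxonomy taxon_list)

-- ===== LEMMAS AND PROOFS =====

-- A string cannot start with both "d__" and "Root".
theorem pv_not_both (s : String) :
    ¬(PySem.Str.startswith s "d__" = true ∧ PySem.Str.startswith s "Root" = true) := by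
  rintro ⟨h1, h2⟩
  cases hs : s.toList with
  | nil => simp [PySem.Str.startswith, PySem.Chars.startswith, hs] at h1
  | cons c cs =>
    simp [PySem.Str.startswith, PySem.Chars.startswith, hs, List.isPrefixOf] at h1 h2
    obtain ⟨hc1, -⟩ := h1
    obtain ⟨hc2, -⟩ := h2
    rw [← hc1] at hc2
    exact absurd hc2 (by decide)

-- The running "keep the smaller rank, first wins on ties" accumulator.
def pvBest (m : String) (t : List String) : String :=
  t.foldl (fun m x => if pvRank x < pvRank m then x else m) m

-- min2?'s fold over enumerate, with the accumulator's index below every upcoming index,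
-- never updates on equal rank (indices only grow), so it keeps the smaller-rank element.
theorem pv_fold_enum (f : Option (Int × String) → (Int × String) → Option (Int × String))
    (hf : ∀ q x, f (some q) x =
      if (decide (pvRank x.2 < pvRank q.2) ||
          !decide (pvRank q.2 < pvRank x.2) && decide (x.1 < q.1)) = true
      then some x else some q)
    (t : List String) (s i : Int) (m : String) (h : i < s) :
    List.foldl f (some (i, m)) (PySem.List.enumerate t s)
    = some (List.foldl (fun (q : Int × String) (x : Int × String) =>
        if pvRank x.2 < pvRank q.2 then x else q) (i, m) (PySem.List.enumerate t s)) := by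
  induction t generalizing s i m with
  | nil => simp [PySem.List.enumerate]
  | cons x t ih =>
    rw [PySem.List.enumerate_cons, List.foldl_cons, List.foldl_cons, hf]
    have hns : ¬ ((s : Int) < i) := by omega
    by_cases hr : pvRank x < pvRank m
    · simpa [hr, hns] using ih (s + 1) s x (by omega)
    · simpa [hr, hns] using ih (s + 1) i m (by omega)

-- the pair fold's second component forgets the indices
theorem pv_fold_snd (t : List String) (s i : Int) (m : String) :
    (List.foldl (fun (q : Int × String) (x : Int × String) =>
        if pvRank x.2 < pvRank q.2 then x else q) (i, m) (PySem.List.enumerate t s)).2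
    = pvBest m t := by
  induction t generalizing s i m with
  | nil => simp [PySem.List.enumerate, pvBest]
  | cons x t ih =>
    rw [PySem.List.enumerate_cons, List.foldl_cons]
    by_cases hr : pvRank x < pvRank m
    · simp [hr, pvBest, ih]
    · simp [hr, pvBest, ih]

-- pvBest picks the first element of the best-ranked class of (m :: t)
theorem pv_best_sel (t : List String) (m : String) :
    pvBest m t =
      match (m :: t).filter (fun x => pvRank x == 0) with
      | h :: _ => h
      | [] =>
        match (m :: t).filter (fun x => pvRank x == 1) with
        | h :: _ => h
        | [] => m := by
  induction t generalizing m with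
  | nil =>
    by_cases h0 : pvRank m = 0
    · simp [pvBest, h0]
    · by_cases h1 : pvRank m = 1 <;> simp [pvBest, h0, h1]
  | cons x t ih =>
    have hx2 : pvRank x = 0 ∨ pvRank x = 1 ∨ pvRank x = 2 := by
      unfold pvRank; split_ifs <;> simp
    have hm2 : pvRank m = 0 ∨ pvRank m = 1 ∨ pvRank m = 2 := by
      unfold pvRank; split_ifs <;> simp
    have hstep : pvBest m (x :: t) = pvBest (if pvRank x < pvRank m then x else m) t := by
      simp [pvBest]
    rcases hm2 with hm | hm | hm <;> rcases hx2 with hx | hx | hx <;>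
      rw [hstep] <;>
      [skip; skip; skip; skip; skip; skip; skip; skip; skip] <;>
      · have h1 := ih m
        have h2 := ih x
        simp_all

-- ===== VERDICT =====
theorem choose_canonical_taxonomy_spec : Claim_equal_choose_canonical_taxonomy := by
  intro xs _ hpre
  unfold Spec_choose_canonical_taxonomy
  cases xs with
  | nil => exact absurd rfl hpre
  | cons x t =>
    -- evaluate B
    have hB : choose_canonical_taxonomy_alt (x :: t) = pvBest x t := by
      unfold choose_canonical_taxonomy_alt PySem.List.min2?
      simp only [PySem.List.enumerate_cons, List.foldl_cons]
      rw [pv_fold_enum _ (fun q x => rfl) t (0 + 1) 0 x (by omega)]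
      simp [pv_fold_snd]
    rw [hB, pv_best_sel]
    -- rewrite A's three filters as rank filters
    unfold choose_canonical_taxonomy
    have hf0 : (x :: t).filter (fun y => PySem.Str.startswith y "d__") =
        (x :: t).filter (fun y => pvRank y == 0) := by
      refine List.filter_congr ?_
      intro y _
      unfold pvRank
      by_cases h : PySem.Str.startswith y "d__" = true <;> split_ifs <;> simp_all
    have hf1 : (x :: t).filter (fun y => PySem.Str.startswith y "Root") =
        (x :: t).filter (fun y => pvRank y == 1) := by
      refine List.filter_congr ?_
      intro y _
      unfold pvRank
      by_cases hd : PySem.Str.startswith y "d__" = true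
      · have := pv_not_both y
        by_cases hr : PySem.Str.startswith y "Root" = true <;> simp_all
      · by_cases hr : PySem.Str.startswith y "Root" = true <;> simp_all
    have hf2 : (x :: t).filter (fun y =>
        !PySem.Str.startswith y "d__" && !PySem.Str.startswith y "Root") =
        (x :: t).filter (fun y => pvRank y == 2) := by
      refine List.filter_congr ?_
      intro y _
      unfold pvRank
      by_cases hd : PySem.Str.startswith y "d__" = true <;>
        by_cases hr : PySem.Str.startswith y "Root" = true <;> simp_all
    rw [hf0, hf1, hf2]
    cases h0 : (x :: t).filter (fun y => pvRank y == 0) with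
    | cons a l => simp
    | nil =>
      cases h1 : (x :: t).filter (fun y => pvRank y == 1) with
      | cons a l => simp
      | nil =>
        -- every element has rank 2, so the third filter is the whole list
        have hall : ∀ y ∈ (x :: t), pvRank y = 2 := by
          intro y hy
          have n0 := List.filter_eq_nil_iff.mp h0 y hy
          have n1 := List.filter_eq_nil_iff.mp h1 y hy
          have : pvRank y = 0 ∨ pvRank y = 1 ∨ pvRank y = 2 := by
            unfold pvRank; split_ifs <;> simp
          simp_all
        have h2 : (x :: t).filter (fun y => pvRank y == 2) = x :: t := by
          rw [List.filter_eq_self]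
          intro y hy
          simp [hall y hy]
        simp [h2]
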